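-- pv_equiv track=rewrite | github.com/demeet2k/athena-mcp-server | Voynich/FULL_TRANSLATION/framework/scripts/bootstrap_dense_folio.py | build_direct_ledger
-- ===== SOURCE A (Python) =====
-- def paragraph_heading(line_id: str) -> str:
--     prefix = line_id.split(".", 1)[0]
--     return f"### {prefix} - fill label"
--
-- def build_direct_ledger(line_ids: list[str]) -> str:
--     if not line_ids:
--         return (
--             "### P? - fill label\n\n"
--             "- `P?.?`\n"
--             "  EVA: ``\n"
--             "  Literal chain: ``\n"
--             "  Operational English: \n"
--         )
--
--     blocks: list[str] = []
--     current_prefix = None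
--     for line_id in line_ids:
--         prefix = line_id.split(".", 1)[0]
--         if prefix != current_prefix:
--             if blocks:
--                 blocks.append("")
--             blocks.append(paragraph_heading(line_id))
--             blocks.append("")
--             current_prefix = prefix
--         blocks.append(f"- `{line_id}`")
--         blocks.append("  EVA: ``")
--         blocks.append("  Literal chain: ``")
--         blocks.append("  Operational English: ")
--         blocks.append("")
--     return "\n".join(blocks).rstrip()
-- ===== SOURCE B (Python) =====
-- def build_direct_ledger(line_ids: list[str]) -> str:
--     if not line_ids:
--         return (
--             "### P? - fill label\n\n"
--             "- `P?.?`\n"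
--             "  EVA: ``\n"
--             "  Literal chain: ``\n"
--             "  Operational English: \n"
--         )
--     # group consecutive line ids by their prefix (text before the first '.')
--     groups: list[tuple[str, list[str]]] = []
--     for lid in line_ids:
--         p = lid.split(".", 1)[0]
--         if groups and groups[-1][0] == p:
--             groups[-1][1].append(lid)
--         else:
--             groups.append((p, [lid]))
--     # render each group as one section, then join sections with two blank lines
--     sections = [
--         f"### {p} - fill label\n\n"
--         + "\n\n".join(
--             f"- `{lid}`\n  EVA: ``\n  Literal chain: ``\n  Operational English: "
--             for lid in grp
--         )
--         for p, grp in groups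
--     ]
--     return "\n\n\n".join(sections).rstrip()
-- ===== Notes on version B (the rewrite author's own statement) =====
-- stated objective: idiomatic
-- what changed: B first groups consecutive line ids by prefix into (prefix, ids) runs, then renders each group as one section string and joins sections, instead of A's single loop that accumulates a flat list of lines with a current-prefix sentinel and separator bookkeeping.
import Mathlib
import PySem

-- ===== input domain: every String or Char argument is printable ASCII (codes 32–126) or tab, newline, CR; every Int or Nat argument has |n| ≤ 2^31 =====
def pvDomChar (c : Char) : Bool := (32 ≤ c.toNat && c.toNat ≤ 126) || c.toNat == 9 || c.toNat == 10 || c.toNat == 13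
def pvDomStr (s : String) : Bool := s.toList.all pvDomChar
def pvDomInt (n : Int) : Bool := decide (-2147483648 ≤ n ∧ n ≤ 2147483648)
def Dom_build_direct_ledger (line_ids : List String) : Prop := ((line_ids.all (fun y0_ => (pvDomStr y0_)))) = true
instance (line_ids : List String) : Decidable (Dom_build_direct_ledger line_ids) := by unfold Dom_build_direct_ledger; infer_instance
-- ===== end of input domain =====

-- B groups consecutive line ids by prefix first and then renders each group as one joined
-- section string, instead of A's single loop accumulating a flat line list with a
-- current-prefix sentinel; objective: a more idiomatic decomposition (same cost).

-- ===== PORT A =====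
def paragraph_heading (line_id : String) : String :=
  let pfx := ((PySem.Str.splitMax? line_id "." 1).getD []).headD ""
  PySem.Str.join "" ["### ", pfx, " - fill label"]
def pvStepA (st : List String × Option String) (line_id : String) : List String × Option String :=
  let pfx := ((PySem.Str.splitMax? line_id "." 1).getD []).headD ""
  let st :=
    if (some pfx) ≠ st.2 then
      ((if st.1 ≠ [] then st.1 ++ [""] else st.1) ++ [paragraph_heading line_id, ""], some pfx)
    else st
  (st.1 ++ [PySem.Str.join "" ["- `", line_id, "`"], "  EVA: ``", "  Literal chain: ``",
            "  Operational English: ", ""], st.2)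
def build_direct_ledger (line_ids : List String) : String :=
  if line_ids = [] then
    "### P? - fill label\n\n- `P?.?`\n  EVA: ``\n  Literal chain: ``\n  Operational English: \n"
  else
    PySem.Str.rstrip (PySem.Str.join "\n" (line_ids.foldl pvStepA ([], none)).1)

-- ===== PORT B =====
def pvPrefixB (lid : String) : String := ((PySem.Str.splitMax? lid "." 1).getD []).headD ""
def pvGroupStep (gs : List (String × List String)) (lid : String) : List (String × List String) :=
  let p := pvPrefixB lid
  match gs.getLast? with
  | some (q, ls) => if q = p then gs.dropLast ++ [(q, ls ++ [lid])] else gs ++ [(p, [lid])]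
  | none => gs ++ [(p, [lid])]
def pvEntryStr (lid : String) : String :=
  PySem.Str.join "" ["- `", lid, "`\n  EVA: ``\n  Literal chain: ``\n  Operational English: "]
def pvSection (g : String × List String) : String :=
  PySem.Str.join "" ["### ", g.1, " - fill label\n\n", PySem.Str.join "\n\n" (g.2.map pvEntryStr)]
def build_direct_ledger_alt (line_ids : List String) : String :=
  if line_ids = [] then
    "### P? - fill label\n\n- `P?.?`\n  EVA: ``\n  Literal chain: ``\n  Operational English: \n"
  else
    PySem.Str.rstrip
      (PySem.Str.join "\n\n\n" ((line_ids.foldl pvGroupStep []).map pvSection))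

-- ===== PRECONDITION & SPEC =====
def Spec_build_direct_ledger (line_ids : List String) (out : String) : Prop := out = build_direct_ledger_alt line_ids
instance (line_ids : List String) (out : String) : Decidable (Spec_build_direct_ledger line_ids out) := by unfold Spec_build_direct_ledger; infer_instance

-- ===== CLAIM (what is proved, stated in full; the proofs are below) =====
def Claim_equal_build_direct_ledger : Prop := ∀ (line_ids : List String), Dom_build_direct_ledger line_ids → Spec_build_direct_ledger line_ids (build_direct_ledger line_ids)

-- ===== LEMMAS AND PROOFS =====

def pvEntryBlocks (lid : String) : List String :=
  [PySem.Str.join "" ["- `", lid, "`"], "  EVA: ``", "  Literal chain: ``",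
   "  Operational English: ", ""]
def pvHeading (p : String) : String := PySem.Str.join "" ["### ", p, " - fill label"]
def pvGB (g : String × List String) : List String :=
  [pvHeading g.1, ""] ++ g.2.flatMap pvEntryBlocks
def pvBlocksOf : List (String × List String) → List String
  | [] => []
  | [g] => pvGB g
  | g :: gs => pvGB g ++ [""] ++ pvBlocksOf gs
def pvLastPref (gs : List (String × List String)) : Option String := gs.getLast?.map Prod.fst

lemma pvGB_ne_nil (g : String × List String) : pvGB g ≠ [] := by simp [pvGB]
lemma pvBlocksOf_cons_ne (g : String × List String) (gs : List (String × List String))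
    (h : gs ≠ []) : pvBlocksOf (g :: gs) = pvGB g ++ [""] ++ pvBlocksOf gs := by
  cases gs with
  | nil => exact absurd rfl h
  | cons a t => rfl
lemma pvBlocksOf_eq_nil_iff (gs : List (String × List String)) :
    pvBlocksOf gs = [] ↔ gs = [] := by
  cases gs with
  | nil => simp [pvBlocksOf]
  | cons a t =>
    cases t with
    | nil => simpa [pvBlocksOf] using pvGB_ne_nil a
    | cons b t' => simp [pvBlocksOf_cons_ne a (b :: t') (by simp), pvGB]
lemma pvBlocksOf_concat (gs : List (String × List String)) (g : String × List String) :
    pvBlocksOf (gs ++ [g]) =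
      (if gs = [] then ([] : List String) else pvBlocksOf gs ++ [""]) ++ pvGB g := by
  induction gs with
  | nil => simp [pvBlocksOf]
  | cons a t ih =>
    cases t with
    | nil => simp [pvBlocksOf]
    | cons b t' =>
      rw [List.cons_append, pvBlocksOf_cons_ne a ((b :: t') ++ [g]) (by simp),
          pvBlocksOf_cons_ne a (b :: t') (by simp), ih]
      simp

lemma pvStep_pair (gs : List (String × List String)) (x : String) :
    pvStepA (pvBlocksOf gs, pvLastPref gs) x =
      (pvBlocksOf (pvGroupStep gs x), pvLastPref (pvGroupStep gs x)) := by
  have hx : ((PySem.Str.splitMax? x "." 1).getD []).headD "" = pvPrefixB x := rfl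
  have hh : paragraph_heading x = pvHeading (pvPrefixB x) := rfl
  rcases hlast : gs.getLast? with _ | ⟨q, ls⟩
  · have hnil : gs = [] := List.getLast?_eq_none_iff.mp hlast
    subst hnil
    simp only [pvStepA, pvGroupStep, hx, hh, pvLastPref]
    simp [pvBlocksOf, pvGB, pvEntryBlocks]
  · obtain ⟨init, rfl⟩ := List.getLast?_eq_some_iff.mp hlast
    simp only [pvStepA, pvGroupStep, hx, hh, List.getLast?_concat, pvLastPref,
               List.dropLast_concat, Option.map_some]
    generalize pvPrefixB x = p at *
    by_cases hq : q = p
    · subst hq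
      simp [pvBlocksOf_concat, pvGB, pvEntryBlocks, List.flatMap_append, List.append_assoc]
    · rw [if_pos (by simpa [eq_comm] using hq), if_pos (by simp [pvBlocksOf_eq_nil_iff]),
          if_neg hq, pvBlocksOf_concat (init ++ [(q, ls)]), if_neg (by simp)]
      simp [pvGB, pvEntryBlocks, List.append_assoc]

lemma pvFoldA_eq (l : List String) :
    l.foldl pvStepA ([], none) =
      (pvBlocksOf (l.foldl pvGroupStep []), pvLastPref (l.foldl pvGroupStep [])) := by
  induction l using List.reverseRecOn with
  | nil => rfl
  | append_singleton t x ih =>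
    rw [List.foldl_append, List.foldl_append, ih]
    simpa using pvStep_pair (t.foldl pvGroupStep []) x

def pvGoodG (gs : List (String × List String)) : Prop := ∀ g ∈ gs, g.2 ≠ []

lemma pvGoodG_step (gs : List (String × List String)) (x : String) (h : pvGoodG gs) :
    pvGoodG (pvGroupStep gs x) := by
  unfold pvGroupStep
  rcases gs.getLast? with _ | ⟨q, ls⟩
  · intro g hg
    rcases List.mem_append.mp hg with h1 | h1
    · exact h g h1
    · simp at h1; subst h1; simp
  · by_cases hq : q = pvPrefixB x
    · simp only [if_pos hq]
      intro g hg
      rcases List.mem_append.mp hg with h1 | h1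
      · exact h g ((List.dropLast_sublist gs).mem h1)
      · simp at h1; subst h1; simp
    · simp only [if_neg hq]
      intro g hg
      rcases List.mem_append.mp hg with h1 | h1
      · exact h g h1
      · simp at h1; subst h1; simp

lemma pvGoodG_foldl (l : List String) (gs : List (String × List String)) (h : pvGoodG gs) :
    pvGoodG (l.foldl pvGroupStep gs) := by
  induction l generalizing gs with
  | nil => exact h
  | cons a t ih => exact ih _ (pvGoodG_step gs a h)

lemma pvGroupStep_ne_nil (gs : List (String × List String)) (x : String) :
    pvGroupStep gs x ≠ [] := by
  unfold pvGroupStep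
  rcases h : gs.getLast? with _ | ⟨q, ls⟩
  · simp
  · dsimp only
    split <;> simp

lemma pvFoldG_ne_nil (l : List String) (gs : List (String × List String)) (h : gs ≠ []) :
    l.foldl pvGroupStep gs ≠ [] := by
  induction l generalizing gs with
  | nil => exact h
  | cons a t ih => exact ih _ (pvGroupStep_ne_nil gs a)

lemma pvJoin_cons_of_ne (sep a : List Char) (rest : List (List Char)) (h : rest ≠ []) :
    PySem.Chars.join sep (a :: rest) = a ++ sep ++ PySem.Chars.join sep rest := by
  cases rest with
  | nil => exact absurd rfl h
  | cons b t => exact PySem.Chars.join_cons_cons sep a b t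

lemma pvJoin_append (sep : List Char) (xs ys : List (List Char)) (hx : xs ≠ []) (hy : ys ≠ []) :
    PySem.Chars.join sep (xs ++ ys) =
      PySem.Chars.join sep xs ++ sep ++ PySem.Chars.join sep ys := by
  induction xs with
  | nil => exact absurd rfl hx
  | cons a t ih =>
    cases t with
    | nil =>
      rw [List.singleton_append, pvJoin_cons_of_ne sep a ys hy, PySem.Chars.join_singleton]
    | cons b t' =>
      rw [List.cons_append, pvJoin_cons_of_ne sep a _ (by simp),
          pvJoin_cons_of_ne sep a (b :: t') (by simp), ih (by simp)]
      simp [List.append_assoc]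

lemma pvEntry_chars (x : String) :
    PySem.Chars.join ['\n'] ((pvEntryBlocks x).map String.toList) =
      (pvEntryStr x).toList ++ ['\n'] := by
  have h0 : "".toList = ([] : List Char) := rfl
  simp only [pvEntryBlocks, pvEntryStr, List.map, PySem.Str.toList_join,
             PySem.Chars.join_cons_cons, PySem.Chars.join_singleton, h0,
             List.append_nil, List.append_assoc]
  congr 2

lemma pvEntries_chars (ls : List String) (h : ls ≠ []) :
    PySem.Chars.join ['\n'] ((ls.flatMap pvEntryBlocks).map String.toList) =
      (PySem.Str.join "\n\n" (ls.map pvEntryStr)).toList ++ ['\n'] := by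
  have hsep : "\n\n".toList = ['\n', '\n'] := rfl
  induction ls with
  | nil => exact absurd rfl h
  | cons x t ih =>
    cases t with
    | nil =>
      rw [List.flatMap_cons, List.flatMap_nil, List.append_nil, pvEntry_chars]
      simp [PySem.Str.toList_join, PySem.Chars.join_singleton]
    | cons y t' =>
      rw [List.flatMap_cons, List.map_append,
          pvJoin_append ['\n'] _ _ (by simp [pvEntryBlocks]) (by simp [pvEntryBlocks]),
          pvEntry_chars, ih (by simp)]
      simp only [List.map_cons, PySem.Str.toList_join, hsep, PySem.Chars.join_cons_cons]
      simp [List.append_assoc, List.map_map]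

lemma pvSection_chars (g : String × List String) (h : g.2 ≠ []) :
    PySem.Chars.join ['\n'] ((pvGB g).map String.toList) = (pvSection g).toList ++ ['\n'] := by
  obtain ⟨p, ls⟩ := g
  have hfm : (ls.flatMap pvEntryBlocks).map String.toList ≠ [] := by
    cases ls with
    | nil => exact absurd rfl h
    | cons a t => simp [pvEntryBlocks]
  have h0 : "".toList = ([] : List Char) := rfl
  have hlbl : " - fill label\n\n".toList = " - fill label".toList ++ ['\n', '\n'] := rfl
  simp only [pvGB, List.map_cons, List.cons_append, List.nil_append,
             PySem.Chars.join_cons_cons,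
             pvJoin_cons_of_ne ['\n'] "".toList _ hfm, pvEntries_chars ls h]
  simp only [pvSection, PySem.Str.toList_join, h0, pvHeading]
  simp [PySem.Chars.join_cons_cons, PySem.Chars.join_singleton, List.append_assoc]

lemma pvBlocks_chars (gs : List (String × List String)) (hne : gs ≠ []) (hg : pvGoodG gs) :
    PySem.Chars.join ['\n'] ((pvBlocksOf gs).map String.toList) =
      PySem.Chars.join ['\n', '\n', '\n'] ((gs.map pvSection).map String.toList) ++ ['\n'] := by
  induction gs with
  | nil => exact absurd rfl hne
  | cons g t ih =>
    cases t with
    | nil =>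
      have := pvSection_chars g (hg g (by simp))
      simpa [pvBlocksOf, PySem.Chars.join_singleton] using this
    | cons b t' =>
      have hgbt : pvBlocksOf (b :: t') ≠ [] := by
        simp [pvBlocksOf_eq_nil_iff]
      rw [pvBlocksOf_cons_ne g (b :: t') (by simp), List.append_assoc, List.map_append,
          pvJoin_append ['\n'] _ _ (by simp [pvGB]) (by simp),
          pvSection_chars g (hg g (by simp))]
      rw [List.cons_append, List.nil_append, List.map_cons,
          pvJoin_cons_of_ne ['\n'] "".toList ((pvBlocksOf (b :: t')).map String.toList)
            (by simpa using hgbt),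
          ih (by simp) (fun x hx => hg x (by simp [hx]))]
      simp only [List.map_cons, PySem.Chars.join_cons_cons]
      simp [List.append_assoc]

lemma pvRstrip_newline (x : List Char) :
    PySem.Chars.rstrip (x ++ ['\n']) = PySem.Chars.rstrip x := by
  simp [PySem.Chars.rstrip, List.reverse_append, List.dropWhile]
  rfl

-- ===== VERDICT (by name: the statement is the Claim_ definition above) =====
theorem build_direct_ledger_spec : Claim_equal_build_direct_ledger := by
  intro l _
  unfold Spec_build_direct_ledger
  unfold build_direct_ledger build_direct_ledger_alt
  by_cases hl : l = []
  · rw [if_pos hl, if_pos hl]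
  · rw [if_neg hl, if_neg hl]
    apply String.ext
    rw [PySem.Str.toList_rstrip, PySem.Str.toList_rstrip, PySem.Str.toList_join,
        PySem.Str.toList_join, pvFoldA_eq l]
    have hg := pvGoodG_foldl l [] (by intro g hg; simp at hg)
    have hne : l.foldl pvGroupStep [] ≠ [] := by
      cases l with
      | nil => exact absurd rfl hl
      | cons a t => exact pvFoldG_ne_nil t _ (pvGroupStep_ne_nil [] a)
    have hnl : "\n".toList = ['\n'] := rfl
    have hnl3 : "\n\n\n".toList = ['\n', '\n', '\n'] := rfl
    rw [hnl, hnl3]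
    rw [pvBlocks_chars _ hne hg, pvRstrip_newline]
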